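-- pv_equiv track=rewrite | github.com/aniruddha-jafa/CS101Project_AniruddhaJafa | Textfile_functions.py | list_strings_to_list_words
-- ===== SOURCE A (Python) =====
-- def list_strings_to_list_words(list_strings):
--
--     string_words = ''
--
--     alpha = 'abcdefghijklmnopqrstuvwxyz'
--
--
--
--     for line in list_strings:
--
--         line.lower()
--
--         for character in line:
--
--             if  character in alpha:
--
--                 string_words = string_words + character
--
--             else:
--
--                 string_words = string_words + " "
--
--         string_words = string_words + " "
--
--     return string_words.split()
-- ===== SOURCE B (Python) =====
-- import re
--
-- def list_strings_to_list_words(list_strings):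
--     # regex extraction of maximal lowercase-ASCII runs; space-join keeps
--     # words on different lines separated, exactly as A's per-line trailing space does
--     return re.findall('[a-z]+', ' '.join(list_strings))
-- ===== Notes on version B (the rewrite author's own statement) =====
-- stated objective: idiomatic
-- what changed: Replaces the character-by-character string building (append letter or space, then split) by joining the lines with a space and extracting maximal [a-z] runs with re.findall (C regex engine, no per-character Python-level string concatenation).
import Mathlib
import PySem

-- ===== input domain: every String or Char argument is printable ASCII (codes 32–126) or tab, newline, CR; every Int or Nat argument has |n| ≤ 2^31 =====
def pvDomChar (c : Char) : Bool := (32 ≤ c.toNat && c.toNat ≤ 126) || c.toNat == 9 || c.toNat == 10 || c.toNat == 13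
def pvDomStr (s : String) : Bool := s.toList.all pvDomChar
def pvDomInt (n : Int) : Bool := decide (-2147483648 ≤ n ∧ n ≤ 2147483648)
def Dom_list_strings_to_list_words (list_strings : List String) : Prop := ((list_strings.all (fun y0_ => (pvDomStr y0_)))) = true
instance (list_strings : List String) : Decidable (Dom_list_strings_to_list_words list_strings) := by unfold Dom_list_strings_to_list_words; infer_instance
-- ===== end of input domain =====

-- B joins the lines with a space and extracts the maximal lowercase-ASCII runs directly (idiomatic regex-style extraction), instead of A's build-a-masked-string-then-split.

-- ===== PORT A =====
-- Python strings are ported on List Char (exact on the ASCII domain); str '+' is List.append;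
-- `character in alpha` (1-char substring test) is ported as list membership, exact for 1-char needles;
-- `.split()` is PySem.Chars.split₀ on the char-list representation (= PySem.Str.split₀).
def list_strings_to_list_words (list_strings : List String) : List String :=
  let alpha : List Char := "abcdefghijklmnopqrstuvwxyz".toList
  let string_words : List Char :=
    list_strings.foldl (fun sw line =>
      let _ := PySem.Str.lower line   -- A calls line.lower() and discards the result
      (line.toList.foldl (fun sw c =>
        if alpha.contains c then sw ++ [c] else sw ++ [' ']) sw) ++ [' ']) []
  (PySem.Chars.split₀ string_words).map String.ofList

-- ===== PORT B =====
def pvIsLow (c : Char) : Bool := 'a' ≤ c && c ≤ 'z'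

-- re.findall('[a-z]+', ·): the maximal runs of lowercase ASCII letters, in order (exact for this pattern)
def pvRuns : List Char → List (List Char)
  | [] => []
  | c :: cs =>
    if pvIsLow c then
      (c :: cs.takeWhile pvIsLow) :: pvRuns (cs.dropWhile pvIsLow)
    else pvRuns cs
termination_by cs => cs.length
decreasing_by
  · exact Nat.lt_succ_of_le (List.length_dropWhile_le _ _)
  · simp

def list_strings_to_list_words_alt (list_strings : List String) : List String :=
  (pvRuns (PySem.Str.join " " list_strings).toList).map String.ofList

-- ===== PRECONDITION & SPEC =====
def Spec_list_strings_to_list_words (list_strings : List String) (out : List String) : Prop := out = list_strings_to_list_words_alt list_strings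
instance (list_strings : List String) (out : List String) : Decidable (Spec_list_strings_to_list_words list_strings out) := by unfold Spec_list_strings_to_list_words; infer_instance

-- ===== CLAIM (what is proved, stated in full; the proofs are below) =====
def Claim_equal_list_strings_to_list_words : Prop := ∀ (list_strings : List String), Dom_list_strings_to_list_words list_strings → Spec_list_strings_to_list_words list_strings (list_strings_to_list_words list_strings)

-- ===== LEMMAS AND PROOFS =====

-- what A's inner loop does to each character
def pvMask (c : Char) : Char := if pvIsLow c then c else ' '

theorem pv_contains_eq_isLow (c : Char) :
    ("abcdefghijklmnopqrstuvwxyz".toList.contains c) = pvIsLow c := by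
  have h : "abcdefghijklmnopqrstuvwxyz".toList =
      ['a','b','c','d','e','f','g','h','i','j','k','l','m','n','o','p','q','r','s','t','u','v','w','x','y','z'] := by decide
  rw [h]
  simp only [pvIsLow, List.contains_eq_mem, List.mem_cons, List.not_mem_nil, or_false,
    ← Bool.decide_and, decide_eq_decide]
  have hc : ∀ d : Char, (c = d ↔ c.toNat = d.toNat) := by
    intro d
    constructor
    · rintro rfl; rfl
    · intro h'; exact Char.ext (UInt32.toNat_inj.mp h')
  have hle : ∀ a b : Char, (a ≤ b ↔ a.toNat ≤ b.toNat) := by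
    intro a b; rw [Char.le_def, UInt32.le_iff_toNat_le]; exact Iff.rfl
  simp only [hc, hle]
  have h97 : ('a':Char).toNat = 97 := rfl
  have h98 : ('b':Char).toNat = 98 := rfl
  have h99 : ('c':Char).toNat = 99 := rfl
  have h100 : ('d':Char).toNat = 100 := rfl
  have h101 : ('e':Char).toNat = 101 := rfl
  have h102 : ('f':Char).toNat = 102 := rfl
  have h103 : ('g':Char).toNat = 103 := rfl
  have h104 : ('h':Char).toNat = 104 := rfl
  have h105 : ('i':Char).toNat = 105 := rfl
  have h106 : ('j':Char).toNat = 106 := rfl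
  have h107 : ('k':Char).toNat = 107 := rfl
  have h108 : ('l':Char).toNat = 108 := rfl
  have h109 : ('m':Char).toNat = 109 := rfl
  have h110 : ('n':Char).toNat = 110 := rfl
  have h111 : ('o':Char).toNat = 111 := rfl
  have h112 : ('p':Char).toNat = 112 := rfl
  have h113 : ('q':Char).toNat = 113 := rfl
  have h114 : ('r':Char).toNat = 114 := rfl
  have h115 : ('s':Char).toNat = 115 := rfl
  have h116 : ('t':Char).toNat = 116 := rfl
  have h117 : ('u':Char).toNat = 117 := rfl
  have h118 : ('v':Char).toNat = 118 := rfl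
  have h119 : ('w':Char).toNat = 119 := rfl
  have h120 : ('x':Char).toNat = 120 := rfl
  have h121 : ('y':Char).toNat = 121 := rfl
  have h122 : ('z':Char).toNat = 122 := rfl
  omega

theorem pv_isLow_not_isspace (c : Char) (h : pvIsLow c = true) :
    PySem.Chars.isspace c = false := by
  simp only [pvIsLow, Bool.and_eq_true, decide_eq_true_eq] at h
  have h1 : 97 ≤ c.toNat := by
    have := h.1; rw [Char.le_def, UInt32.le_iff_toNat_le] at this; exact this
  have h2 : c.toNat ≤ 122 := by
    have := h.2; rw [Char.le_def, UInt32.le_iff_toNat_le] at this; exact this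
  simp only [PySem.Chars.isspace, Bool.or_eq_false_iff, Bool.and_eq_false_iff,
    decide_eq_false_iff_not]
  omega

-- A's inner foldl appends the masked characters
theorem pv_inner_foldl (cs : List Char) (sw : List Char) :
    cs.foldl (fun sw c => if "abcdefghijklmnopqrstuvwxyz".toList.contains c then sw ++ [c] else sw ++ [' ']) sw
      = sw ++ cs.map pvMask := by
  induction cs generalizing sw with
  | nil => simp
  | cons c cs ih =>
    simp only [List.foldl_cons, List.map_cons]
    rw [ih, pv_contains_eq_isLow]
    by_cases h : pvIsLow c = true <;> simp [h, pvMask]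

-- A's outer foldl flattens the masked lines, each followed by a space
theorem pv_outer_foldl (ls : List String) (sw : List Char) :
    ls.foldl (fun sw line =>
        (line.toList.foldl (fun sw c =>
          if "abcdefghijklmnopqrstuvwxyz".toList.contains c then sw ++ [c] else sw ++ [' ']) sw) ++ [' ']) sw
      = sw ++ (ls.map (fun l => l.toList.map pvMask ++ [' '])).flatten := by
  induction ls generalizing sw with
  | nil => simp
  | cons l ls ih =>
    simp only [List.foldl_cons, List.map_cons, List.flatten_cons]
    rw [pv_inner_foldl, ih]
    simp

theorem pv_takeWhile_sep (p : Char → Bool) (sep : Char) (hs : ¬ p sep = true) (xs ys : List Char) :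
    (xs ++ sep :: ys).takeWhile p = xs.takeWhile p := by
  induction xs with
  | nil => simp [List.takeWhile, hs]
  | cons c cs ih =>
    simp only [List.cons_append, List.takeWhile]
    cases p c <;> simp [ih]

theorem pv_dropWhile_sep (p : Char → Bool) (sep : Char) (hs : ¬ p sep = true) (xs ys : List Char) :
    (xs ++ sep :: ys).dropWhile p = xs.dropWhile p ++ sep :: ys := by
  induction xs with
  | nil => simp [List.dropWhile, hs]
  | cons c cs ih =>
    simp only [List.cons_append, List.dropWhile]
    cases p c <;> simp [ih]

-- pvRuns distributes over a non-letter separator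
theorem pvRuns_append_sep (sep : Char) (hs : ¬ pvIsLow sep = true) (xs ys : List Char) :
    pvRuns (xs ++ sep :: ys) = pvRuns xs ++ pvRuns ys := by
  induction xs using pvRuns.induct with
  | case1 => simp [pvRuns, hs]
  | case2 c cs hc ih =>
    rw [List.cons_append, pvRuns, if_pos hc, pvRuns, if_pos hc,
      pv_takeWhile_sep _ _ hs, pv_dropWhile_sep _ _ hs, ih]
    simp
  | case3 c cs hc ih =>
    rw [List.cons_append, pvRuns, if_neg hc, pvRuns, if_neg hc, ih]

theorem pv_takeWhile_mask (xs : List Char) :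
    (xs.map pvMask).takeWhile pvIsLow = xs.takeWhile pvIsLow := by
  induction xs with
  | nil => simp
  | cons c cs ih =>
    by_cases h : pvIsLow c = true
    · have hm : pvMask c = c := by simp [pvMask, h]
      rw [List.map_cons, hm, List.takeWhile_cons_of_pos h, List.takeWhile_cons_of_pos h, ih]
    · have hm : pvMask c = ' ' := by simp [pvMask, h]
      rw [List.map_cons, hm, List.takeWhile_cons_of_neg (by decide), List.takeWhile_cons_of_neg h]

theorem pv_dropWhile_mask (xs : List Char) :
    (xs.map pvMask).dropWhile pvIsLow = (xs.dropWhile pvIsLow).map pvMask := by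
  induction xs with
  | nil => simp
  | cons c cs ih =>
    by_cases h : pvIsLow c = true
    · have hm : pvMask c = c := by simp [pvMask, h]
      rw [List.map_cons, hm, List.dropWhile_cons_of_pos h, List.dropWhile_cons_of_pos h, ih]
    · have hm : pvMask c = ' ' := by simp [pvMask, h]
      rw [List.map_cons, hm, List.dropWhile_cons_of_neg (by decide), List.dropWhile_cons_of_neg h,
        List.map_cons, hm]

-- masking does not change the runs
theorem pvRuns_map_mask (xs : List Char) : pvRuns (xs.map pvMask) = pvRuns xs := by
  induction xs using pvRuns.induct with
  | case1 => simp [pvRuns]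
  | case2 c cs hc ih =>
    rw [List.map_cons]
    have hm : pvMask c = c := by simp [pvMask, hc]
    rw [hm, pvRuns, if_pos hc, pvRuns, if_pos hc, pv_takeWhile_mask, pv_dropWhile_mask, ih]
  | case3 c cs hc ih =>
    rw [List.map_cons]
    have hm : pvMask c = ' ' := by simp [pvMask, hc]
    have hsp : ¬ pvIsLow ' ' = true := by decide
    rw [hm, pvRuns, if_neg hsp, pvRuns, if_neg hc, ih]

-- split₀'s worker computes the runs on a letters-and-spaces string
theorem pv_go_spec (xs : List Char) (cur : List Char) (acc : List (List Char))
    (hxs : ∀ c ∈ xs, PySem.Chars.isspace c = true ∨ pvIsLow c = true) :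
    PySem.Chars.split₀.go xs cur acc = acc.reverse ++
      (if cur.isEmpty then pvRuns xs
       else (cur.reverse ++ xs.takeWhile pvIsLow) :: pvRuns (xs.dropWhile pvIsLow)) := by
  induction xs generalizing cur acc with
  | nil =>
    cases cur <;> simp [PySem.Chars.split₀.go, pvRuns]
  | cons c rest ih =>
    have hxr : ∀ c' ∈ rest, PySem.Chars.isspace c' = true ∨ pvIsLow c' = true := by
      intro c' hc'; exact hxs c' (List.mem_cons_of_mem _ hc')
    have ih' : ∀ cur acc, PySem.Chars.split₀.go rest cur acc = acc.reverse ++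
        (if cur.isEmpty then pvRuns rest
         else (cur.reverse ++ rest.takeWhile pvIsLow) :: pvRuns (rest.dropWhile pvIsLow)) :=
      fun cur acc => ih cur acc hxr
    by_cases hsp : PySem.Chars.isspace c = true
    · have hlo : ¬ pvIsLow c = true := by
        intro h; rw [pv_isLow_not_isspace c h] at hsp; exact Bool.false_ne_true hsp
      rw [PySem.Chars.split₀.go, if_pos hsp,
        List.takeWhile_cons_of_neg hlo, List.dropWhile_cons_of_neg hlo]
      have hpr : pvRuns (c :: rest) = pvRuns rest := by rw [pvRuns, if_neg hlo]
      cases cur with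
      | nil => simp [ih', hpr]
      | cons a as => simp [ih', hpr]
    · have hlo : pvIsLow c = true := (hxs c List.mem_cons_self).resolve_left hsp
      rw [PySem.Chars.split₀.go, if_neg hsp, ih']
      have hpr : pvRuns (c :: rest) = (c :: rest.takeWhile pvIsLow) :: pvRuns (rest.dropWhile pvIsLow) := by
        rw [pvRuns, if_pos hlo]
      cases cur with
      | nil => simp [hpr]
      | cons a as =>
        simp [List.takeWhile_cons_of_pos hlo, List.dropWhile_cons_of_pos hlo]

theorem pv_split₀_eq_pvRuns (xs : List Char)
    (hxs : ∀ c ∈ xs, PySem.Chars.isspace c = true ∨ pvIsLow c = true) :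
    PySem.Chars.split₀ xs = pvRuns xs := by
  rw [PySem.Chars.split₀, pv_go_spec xs [] [] hxs]
  simp

-- the two flattened texts have the same runs
theorem pv_runs_join (ls : List String) :
    pvRuns ((ls.map (fun l => l.toList ++ [' '])).flatten)
      = pvRuns (PySem.Chars.join [' '] (ls.map String.toList)) := by
  have hsp : ¬ pvIsLow ' ' = true := by decide
  induction ls with
  | nil =>
    have h0 : PySem.Chars.join [' '] ([] : List (List Char)) = [] := by
      simp [PySem.Chars.join, List.intercalate]
    simp [h0]
  | cons l rest ih =>
    cases rest with
    | nil =>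
      have e1 : ([l].map (fun l => l.toList ++ [' '])).flatten = l.toList ++ ' ' :: [] := by simp
      have e2 : PySem.Chars.join [' '] ([l].map String.toList) = l.toList := by
        simp [PySem.Chars.join_singleton]
      rw [e1, e2, pvRuns_append_sep ' ' hsp]
      have : pvRuns [] = [] := by rw [pvRuns]
      rw [this, List.append_nil]
    | cons l2 rest2 =>
      have e1 : ((l :: l2 :: rest2).map (fun l => l.toList ++ [' '])).flatten
          = l.toList ++ ' ' :: ((l2 :: rest2).map (fun l => l.toList ++ [' '])).flatten := by simp
      have e2 : PySem.Chars.join [' '] ((l :: l2 :: rest2).map String.toList)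
          = l.toList ++ ' ' :: PySem.Chars.join [' '] ((l2 :: rest2).map String.toList) := by
        rw [List.map_cons, List.map_cons, PySem.Chars.join_cons_cons]
        simp
      rw [e1, e2, pvRuns_append_sep ' ' hsp, pvRuns_append_sep ' ' hsp, ih]

-- ===== VERDICT (by name: the statement is the Claim_ definition above) =====
theorem list_strings_to_list_words_spec : Claim_equal_list_strings_to_list_words := by
  intro ls _
  unfold Spec_list_strings_to_list_words list_strings_to_list_words list_strings_to_list_words_alt
  simp only []
  rw [pv_outer_foldl ls []]
  have hmask : (ls.map (fun l => l.toList.map pvMask ++ [' '])).flatten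
      = ((ls.map (fun l => l.toList ++ [' '])).flatten).map pvMask := by
    have h1 : ∀ l : String, l.toList.map pvMask ++ [' '] = (l.toList ++ [' ']).map pvMask := by
      intro l; simp [pvMask]
    simp only [h1]
    rw [List.map_flatten, List.map_map]
    rfl
  rw [List.nil_append, hmask]
  have hchars : ∀ c ∈ ((ls.map (fun l => l.toList ++ [' '])).flatten).map pvMask,
      PySem.Chars.isspace c = true ∨ pvIsLow c = true := by
    intro c hc
    rcases List.mem_map.mp hc with ⟨d, _, rfl⟩
    by_cases h : pvIsLow d = true
    · right; simp [pvMask, h]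
    · left; simp [pvMask, h, PySem.Chars.isspace]
  rw [pv_split₀_eq_pvRuns _ hchars, pvRuns_map_mask, pv_runs_join]
  have hjoin : (PySem.Str.join " " ls).toList = PySem.Chars.join [' '] (ls.map String.toList) := by
    simp [PySem.Str.join]
  rw [hjoin]
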